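-- pv_equiv track=rewrite | github.com/Revilo199/Thesis-Code | thesiscodev_last_update_2022.py | findbiandbc
-- ===== SOURCE A (Python) =====
-- def findbiandbc(points):
--     ai=-234234234
--     bi=-23452345
--     ci=324523452345
--     di=2489727498234
--     for point in points:
--         if point[0]==0 and point[1]<ci:
--             ci=point[1]
--         if point[0]==1 and point[1]>bi:
--             bi=point[1]
--         if point[0]==0 and point[1]>ai:
--             ai=point[1]
--         if point[0]==1 and point[1]<di:
--             di=point[1]
--     return(ai,bi,ci,di)
-- ===== SOURCE B (Python) =====
-- def findbiandbc(points):
--     g0 = [y for x, y in points if x == 0]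
--     g1 = [y for x, y in points if x == 1]
--     ai = max([-234234234] + g0)
--     bi = max([-23452345] + g1)
--     ci = min([324523452345] + g0)
--     di = min([2489727498234] + g1)
--     return (ai, bi, ci, di)
-- ===== Notes on version B (the rewrite author's own statement) =====
-- stated objective: simpler
-- what changed: Replaces the fused four-way conditional scan by partitioning the points into the x==0 and x==1 y-lists and computing each of the four results as a max/min reduction seeded with A's sentinel.
import Mathlib
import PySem

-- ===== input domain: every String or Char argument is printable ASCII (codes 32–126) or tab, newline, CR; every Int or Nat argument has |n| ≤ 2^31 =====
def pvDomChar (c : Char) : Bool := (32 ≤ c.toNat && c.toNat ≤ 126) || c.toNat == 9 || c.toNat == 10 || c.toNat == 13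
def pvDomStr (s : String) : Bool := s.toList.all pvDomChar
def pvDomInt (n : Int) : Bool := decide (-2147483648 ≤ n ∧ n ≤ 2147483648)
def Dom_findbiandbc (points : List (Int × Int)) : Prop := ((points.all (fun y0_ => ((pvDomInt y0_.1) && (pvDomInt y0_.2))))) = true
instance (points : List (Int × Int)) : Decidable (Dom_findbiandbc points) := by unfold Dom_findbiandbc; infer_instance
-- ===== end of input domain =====

-- B partitions the points into the x==0 and x==1 y-lists and computes each result as a sentinel-seeded max/min reduction (simpler decomposition, same O(n) cost).


-- ===== PORT A =====
def findbiandbc (points : List (Int × Int)) : Int × Int × Int × Int :=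
  points.foldl (fun st point =>
    let ci := if point.1 = 0 ∧ point.2 < st.2.2.1 then point.2 else st.2.2.1
    let bi := if point.1 = 1 ∧ point.2 > st.2.1 then point.2 else st.2.1
    let ai := if point.1 = 0 ∧ point.2 > st.1 then point.2 else st.1
    let di := if point.1 = 1 ∧ point.2 < st.2.2.2 then point.2 else st.2.2.2
    (ai, bi, ci, di)) (-234234234, -23452345, 324523452345, 2489727498234)

-- ===== PORT B =====
def findbiandbc_alt (points : List (Int × Int)) : Int × Int × Int × Int :=
  let g0 := (points.filter (fun p => p.1 == 0)).map Prod.snd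
  let g1 := (points.filter (fun p => p.1 == 1)).map Prod.snd
  -- max([s] + g) in Python = left fold of max over g seeded with s
  (g0.foldl max (-234234234), g1.foldl max (-23452345),
   g0.foldl min 324523452345, g1.foldl min 2489727498234)

-- ===== PRECONDITION & SPEC =====
def Spec_findbiandbc (points : List (Int × Int)) (out : Int × Int × Int × Int) : Prop := out = findbiandbc_alt points
instance (points : List (Int × Int)) (out : Int × Int × Int × Int) : Decidable (Spec_findbiandbc points out) := by unfold Spec_findbiandbc; infer_instance

-- ===== CLAIM (what is proved, stated in full; the proofs are below) =====
def Claim_equal_findbiandbc : Prop := ∀ (points : List (Int × Int)), Dom_findbiandbc points → Spec_findbiandbc points (findbiandbc points)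

-- ===== LEMMAS AND PROOFS =====

lemma findbiandbc_loop (pts : List (Int × Int)) : ∀ (ai bi ci di : Int),
    pts.foldl (fun st point =>
      let ci := if point.1 = 0 ∧ point.2 < st.2.2.1 then point.2 else st.2.2.1
      let bi := if point.1 = 1 ∧ point.2 > st.2.1 then point.2 else st.2.1
      let ai := if point.1 = 0 ∧ point.2 > st.1 then point.2 else st.1
      let di := if point.1 = 1 ∧ point.2 < st.2.2.2 then point.2 else st.2.2.2
      (ai, bi, ci, di)) (ai, bi, ci, di)
    = (((pts.filter (fun p => p.1 == 0)).map Prod.snd).foldl max ai,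
       ((pts.filter (fun p => p.1 == 1)).map Prod.snd).foldl max bi,
       ((pts.filter (fun p => p.1 == 0)).map Prod.snd).foldl min ci,
       ((pts.filter (fun p => p.1 == 1)).map Prod.snd).foldl min di) := by
  induction pts with
  | nil => intro ai bi ci di; simp
  | cons p tl ih =>
    intro ai bi ci di
    obtain ⟨x, y⟩ := p
    simp only [List.foldl_cons]
    rw [ih]
    by_cases hx0 : x = 0
    · subst hx0
      have hb : (if (0:Int) = 1 ∧ y > bi then y else bi) = bi := by split_ifs <;> omega
      have hd : (if (0:Int) = 1 ∧ y < di then y else di) = di := by split_ifs <;> omega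
      simp only [hb, hd, List.filter_cons]
      norm_num
      constructor <;> congr 1 <;> omega
    · by_cases hx1 : x = 1
      · subst hx1
        have ha : (if (1:Int) = 0 ∧ y > ai then y else ai) = ai := by split_ifs <;> omega
        have hc : (if (1:Int) = 0 ∧ y < ci then y else ci) = ci := by split_ifs <;> omega
        simp only [ha, hc, List.filter_cons]
        norm_num
        constructor <;> congr 1 <;> omega
      · have ha : (if x = 0 ∧ y > ai then y else ai) = ai := by split_ifs with h; exact absurd h.1 hx0; rfl
        have hc : (if x = 0 ∧ y < ci then y else ci) = ci := by split_ifs with h; exact absurd h.1 hx0; rfl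
        have hb : (if x = 1 ∧ y > bi then y else bi) = bi := by split_ifs with h; exact absurd h.1 hx1; rfl
        have hd : (if x = 1 ∧ y < di then y else di) = di := by split_ifs with h; exact absurd h.1 hx1; rfl
        simp only [ha, hb, hc, hd, List.filter_cons]
        simp [hx0, hx1]

-- ===== VERDICT (by name: the statement is the Claim_ definition above) =====
theorem findbiandbc_spec : Claim_equal_findbiandbc := by
  intro points _
  unfold Spec_findbiandbc findbiandbc findbiandbc_alt
  rw [findbiandbc_loop]
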